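-- pv_equiv track=rewrite | github.com/przecze/wizardle | preprocessing/resolve_overrides.py | find_context_in_new
-- ===== SOURCE A (Python) =====
-- DASH_TOKENS = {"—", "..."}
--
-- def _non_dash(rows) -> list[tuple[int, str]]:
--     return [(i, tok) for i, (_, tok) in enumerate(rows) if tok not in DASH_TOKENS]
--
-- def tokens_compatible(old_tok: str, new_tok: str) -> bool:
--     """True if old and new token are compatible (exact match or one starts with the other)."""
--     return old_tok == new_tok or new_tok.startswith(old_tok) or old_tok.startswith(new_tok)
--
-- def find_context_in_new(old_rows, old_pos, new_rows, window=8, min_window=4):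
--     """
--     Find the position in new_rows corresponding to old_pos in old_rows.
--
--     Strategy: extract window of non-dash tokens starting at old_pos from old;
--     search new file for matching subsequence using compatible token comparison
--     (handles cases where tokenizer merged adjacent tokens).
--     """
--     old_nd = _non_dash(old_rows)
--     new_nd = _non_dash(new_rows)
--
--     # Find nd index of old_pos
--     old_nd_start = next((ni for ni, (ri, _) in enumerate(old_nd) if ri >= old_pos), None)
--     if old_nd_start is None:
--         return None
--
--     # Extract anchor context (prefer tokens AFTER the puzzle pos to avoid boundary issues)
--     # Use tokens from old_nd_start to old_nd_start+window
--     old_ctx = [tok for _, tok in old_nd[old_nd_start: old_nd_start + window]]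
--
--     # Try decreasing window sizes
--     for w in range(len(old_ctx), min_window - 1, -1):
--         sub = old_ctx[:w]
--         for start in range(len(new_nd) - w + 1):
--             if all(tokens_compatible(sub[j], new_nd[start + j][1]) for j in range(w)):
--                 return new_nd[start][0]
--
--     return None
-- ===== SOURCE B (Python) =====
-- DASH_TOKENS = {"—", "..."}
--
-- def _non_dash(rows):
--     return [(i, tok) for i, (_, tok) in enumerate(rows) if tok not in DASH_TOKENS]
--
-- def tokens_compatible(old_tok: str, new_tok: str) -> bool:
--     return old_tok == new_tok or new_tok.startswith(old_tok) or old_tok.startswith(new_tok)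
--
-- def find_context_in_new(old_rows, old_pos, new_rows, window=8, min_window=4):
--     old_nd = _non_dash(old_rows)
--     new_nd = _non_dash(new_rows)
--
--     old_nd_start = next((ni for ni, (ri, _) in enumerate(old_nd) if ri >= old_pos), None)
--     if old_nd_start is None:
--         return None
--
--     old_ctx = [tok for _, tok in old_nd[old_nd_start: old_nd_start + window]]
--
--     # One pass over start positions: longest compatible prefix per start,
--     # keeping the earliest start achieving the maximum.
--     best_len = -1
--     best_start = -1
--     for start in range(len(new_nd)):
--         plen = 0
--         while (plen < len(old_ctx) and start + plen < len(new_nd)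
--                and tokens_compatible(old_ctx[plen], new_nd[start + plen][1])):
--             plen += 1
--         if plen > best_len:
--             best_len = plen
--             best_start = start
--
--     if best_len >= min_window:
--         return new_nd[best_start][0]
--     return None
-- ===== Notes on version B (the rewrite author's own statement) =====
-- stated objective: alternative
-- what changed: Replaces A's nested search over decreasing window sizes (for each w, rescan all starts) by a single pass over start positions that computes the longest compatible prefix per start and keeps the earliest maximum, returning it if it reaches min_window.
import Mathlib
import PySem

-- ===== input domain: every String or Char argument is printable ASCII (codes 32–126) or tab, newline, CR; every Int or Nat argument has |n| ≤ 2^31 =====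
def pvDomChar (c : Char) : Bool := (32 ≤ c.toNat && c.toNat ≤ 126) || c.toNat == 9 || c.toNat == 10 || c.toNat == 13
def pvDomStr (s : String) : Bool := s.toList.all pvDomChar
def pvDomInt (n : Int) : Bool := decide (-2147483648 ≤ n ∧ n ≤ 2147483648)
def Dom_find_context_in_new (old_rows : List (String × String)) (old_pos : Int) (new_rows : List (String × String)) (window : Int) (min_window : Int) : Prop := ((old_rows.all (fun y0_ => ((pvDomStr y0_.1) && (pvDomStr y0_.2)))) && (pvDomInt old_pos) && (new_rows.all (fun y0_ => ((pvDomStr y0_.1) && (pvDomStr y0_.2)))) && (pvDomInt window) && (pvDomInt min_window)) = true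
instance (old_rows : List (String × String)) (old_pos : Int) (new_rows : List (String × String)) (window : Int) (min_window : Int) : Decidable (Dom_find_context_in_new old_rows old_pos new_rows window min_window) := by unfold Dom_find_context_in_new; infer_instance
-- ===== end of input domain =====

-- B replaces A's nested search over decreasing window sizes by a single pass that computes the
-- longest compatible prefix per start position and keeps the earliest maximum (objective: alternative).

-- ===== PORT A =====
-- module-level helpers, shared verbatim by both Pythons (A and B use the same preamble)
def DASH_TOKENS : PySem.Set String := PySem.Set.ofList ["—", "..."]

-- [(i, tok) for i, (_, tok) in enumerate(rows) if tok not in DASH_TOKENS]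
def non_dash_aux (i : Int) : List (String × String) → List (Int × String)
  | [] => []
  | r :: rest =>
      if PySem.Set.contains DASH_TOKENS r.2 then non_dash_aux (i + 1) rest
      else (i, r.2) :: non_dash_aux (i + 1) rest

def non_dash (rows : List (String × String)) : List (Int × String) := non_dash_aux 0 rows

def tokens_compatible (old_tok new_tok : String) : Bool :=
  old_tok == new_tok || PySem.Str.startswith new_tok old_tok || PySem.Str.startswith old_tok new_tok

-- inner 'for start in range(len(new_nd) - w + 1)' loop of A; pyGetD is exact here: whenever
-- Python evaluates these lookups inside Pre_, the index is in range (j < w ≤ len(sub), start + j < len(new_nd))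
def A_tryW (old_ctx : List String) (new_nd : List (Int × String)) (w : Int) : Option Int :=
  let sub := PySem.List.slice old_ctx none (some w)
  (PySem.List.pyRange 0 ((new_nd.length : Int) - w + 1) 1).findSome? (fun start =>
    if (PySem.List.pyRange 0 w 1).all (fun j =>
        tokens_compatible (PySem.List.pyGetD sub j "") (PySem.List.pyGetD new_nd (start + j) (0, "")).2)
    then some (PySem.List.pyGetD new_nd start (0, "")).1
    else none)

-- 'for w in range(len(old_ctx), min_window - 1, -1)' with early return
def A_search (old_ctx : List String) (new_nd : List (Int × String)) (min_window : Int) : Option Int :=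
  (PySem.List.pyRange (old_ctx.length : Int) (min_window - 1) (-1)).findSome? (A_tryW old_ctx new_nd)

def find_context_in_new (old_rows : List (String × String)) (old_pos : Int) (new_rows : List (String × String)) (window : Int) (min_window : Int) : Option Int :=
  let old_nd := non_dash old_rows
  let new_nd := non_dash new_rows
  match List.findIdx? (fun p => decide (old_pos ≤ p.1)) old_nd with
  | none => none
  | some old_nd_start =>
      let old_ctx := (PySem.List.slice old_nd (some (old_nd_start : Int)) (some ((old_nd_start : Int) + window))).map Prod.snd
      A_search old_ctx new_nd min_window

-- ===== PORT B =====
-- B's 'while' loop: longest compatible prefix at a given start (getD is exact: Python only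
-- indexes old_ctx[plen] / new_nd[start+plen] after checking both bounds)
def alt_prefix_len (old_ctx : List String) (new_nd : List (Int × String)) (start plen : Nat) : Nat :=
  if h : plen < old_ctx.length ∧ start + plen < new_nd.length ∧
         tokens_compatible (old_ctx.getD plen "") ((new_nd.getD (start + plen) (0, "")).2) = true
  then alt_prefix_len old_ctx new_nd start (plen + 1)
  else plen
termination_by old_ctx.length - plen
decreasing_by obtain ⟨h1, -, -⟩ := h; omega

-- B's single pass over starts, tracking (best_len, best_start)
def alt_scan (old_ctx : List String) (new_nd : List (Int × String)) : Int × Int :=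
  (List.range new_nd.length).foldl
    (fun acc start =>
      let p := alt_prefix_len old_ctx new_nd start 0
      if (p : Int) > acc.1 then ((p : Int), (start : Int)) else acc)
    (-1, -1)

def find_context_in_new_alt (old_rows : List (String × String)) (old_pos : Int) (new_rows : List (String × String)) (window : Int) (min_window : Int) : Option Int :=
  let old_nd := non_dash old_rows
  let new_nd := non_dash new_rows
  match List.findIdx? (fun p => decide (old_pos ≤ p.1)) old_nd with
  | none => none
  | some old_nd_start =>
      let old_ctx := (PySem.List.slice old_nd (some (old_nd_start : Int)) (some ((old_nd_start : Int) + window))).map Prod.snd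
      let best := alt_scan old_ctx new_nd
      -- new_nd[best_start][0]: in range whenever Python returns here inside Pre_; pyGet? is exact
      if best.1 ≥ min_window then (PySem.List.pyGet? new_nd best.2).map Prod.fst
      else none

-- ===== PRECONDITION & SPEC =====
-- Pre_ excludes exactly the inputs where A raises IndexError: min_window ≤ 0, every new-file token
-- is a dash token, and some old row at index ≥ old_pos is non-dash — the vacuous width-0 match then
-- evaluates new_nd[0] on the empty new_nd.
def Pre_find_context_in_new (old_rows : List (String × String)) (old_pos : Int) (new_rows : List (String × String)) (window : Int) (min_window : Int) : Prop :=
  ¬ (min_window ≤ 0 ∧ (∀ r ∈ new_rows, r.2 = "—" ∨ r.2 = "...") ∧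
     ∃ i, i < old_rows.length ∧ old_pos ≤ (i : Int) ∧ ¬ (old_rows[i]!.2 = "—" ∨ old_rows[i]!.2 = "..."))
instance (old_rows : List (String × String)) (old_pos : Int) (new_rows : List (String × String)) (window : Int) (min_window : Int) : Decidable (Pre_find_context_in_new old_rows old_pos new_rows window min_window) := by unfold Pre_find_context_in_new; infer_instance

def pvWitness_find_context_in_new : (List (String × String)) × Int × (List (String × String)) × Int × Int :=
  ([("a", "tok")], 0, [("b", "tok")], 8, 4)

def Spec_find_context_in_new (old_rows : List (String × String)) (old_pos : Int) (new_rows : List (String × String)) (window : Int) (min_window : Int) (out : Option Int) : Prop := out = find_context_in_new_alt old_rows old_pos new_rows window min_window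
instance (old_rows : List (String × String)) (old_pos : Int) (new_rows : List (String × String)) (window : Int) (min_window : Int) (out : Option Int) : Decidable (Spec_find_context_in_new old_rows old_pos new_rows window min_window out) := by unfold Spec_find_context_in_new; infer_instance

-- ===== CLAIM (what is proved, stated in full; the proofs are below) =====
def Claim_equal_find_context_in_new : Prop := ∀ (old_rows : List (String × String)) (old_pos : Int) (new_rows : List (String × String)) (window : Int) (min_window : Int), Dom_find_context_in_new old_rows old_pos new_rows window min_window → Pre_find_context_in_new old_rows old_pos new_rows window min_window → Spec_find_context_in_new old_rows old_pos new_rows window min_window (find_context_in_new old_rows old_pos new_rows window min_window)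

-- ===== LEMMAS AND PROOFS =====

lemma contains_dash_iff (t : String) :
    PySem.Set.contains DASH_TOKENS t = true ↔ (t = "—" ∨ t = "...") := by
  simp [DASH_TOKENS, PySem.Set.contains, PySem.Set.ofList, PySem.Set.add, PySem.Set.empty]

lemma non_dash_aux_eq_nil_iff (rows : List (String × String)) :
    ∀ i, (non_dash_aux i rows = [] ↔ ∀ r ∈ rows, (r.2 = "—" ∨ r.2 = "...")) := by
  induction rows with
  | nil => simp [non_dash_aux]
  | cons r rest ih =>
      intro i
      rw [non_dash_aux]
      by_cases hd : PySem.Set.contains DASH_TOKENS r.2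
      · rw [if_pos hd]
        simp only [List.mem_cons]
        constructor
        · intro h x hx
          rcases hx with rfl | hx
          · exact (contains_dash_iff x.2).mp hd
          · exact ((ih (i+1)).mp h) x hx
        · intro h
          exact (ih (i+1)).mpr (fun x hx => h x (Or.inr hx))
      · rw [if_neg hd]
        simp only [List.mem_cons]
        constructor
        · intro h; exact absurd h (List.cons_ne_nil _ _)
        · intro h
          exact absurd ((contains_dash_iff r.2).mpr (h r (Or.inl rfl))) hd

lemma mem_non_dash_aux (rows : List (String × String)) :
    ∀ i x, x ∈ non_dash_aux i rows →
      ∃ j, j < rows.length ∧ ¬ (rows[j]!.2 = "—" ∨ rows[j]!.2 = "...") ∧ x.1 = i + (j : Int) := by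
  induction rows with
  | nil => simp [non_dash_aux]
  | cons r rest ih =>
      intro i x hx
      rw [non_dash_aux] at hx
      by_cases hd : PySem.Set.contains DASH_TOKENS r.2
      · rw [if_pos hd] at hx
        obtain ⟨j, hj, hnd, hx1⟩ := ih (i + 1) x hx
        refine ⟨j + 1, by simp only [List.length_cons]; omega, ?_, by rw [hx1]; push_cast; ring⟩
        simpa using hnd
      · rw [if_neg hd] at hx
        rcases List.mem_cons.mp hx with rfl | hx
        · refine ⟨0, by simp, ?_, by simp⟩
          simpa using fun h => hd ((contains_dash_iff r.2).mpr h)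
        · obtain ⟨j, hj, hnd, hx1⟩ := ih (i + 1) x hx
          refine ⟨j + 1, by simp only [List.length_cons]; omega, ?_, by rw [hx1]; push_cast; ring⟩
          simpa using hnd


-- the condition of B's while loop, as a named predicate (definitionally the dite condition of alt_prefix_len)
def goodTok (ctx : List String) (nd : List (Int × String)) (s j : Nat) : Prop :=
  j < ctx.length ∧ s + j < nd.length ∧
  tokens_compatible (ctx.getD j "") ((nd.getD (s + j) (0, "")).2) = true

lemma plen_spec (ctx : List String) (nd : List (Int × String)) (s : Nat) :
    ∀ p, (∀ j, j < p → goodTok ctx nd s j) →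
      (∀ j, j < alt_prefix_len ctx nd s p → goodTok ctx nd s j) ∧
      ¬ goodTok ctx nd s (alt_prefix_len ctx nd s p) := by
  suffices H : ∀ (m p : Nat), ctx.length - p ≤ m → (∀ j, j < p → goodTok ctx nd s j) →
      (∀ j, j < alt_prefix_len ctx nd s p → goodTok ctx nd s j) ∧
      ¬ goodTok ctx nd s (alt_prefix_len ctx nd s p) from
    fun p h => H (ctx.length - p) p le_rfl h
  intro m
  induction m with
  | zero =>
      intro p hp h
      rw [alt_prefix_len]
      have hc : ¬ (p < ctx.length ∧ s + p < nd.length ∧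
          tokens_compatible (ctx.getD p "") ((nd.getD (s + p) (0, "")).2) = true) := by
        intro hc; omega
      rw [dif_neg hc]
      exact ⟨h, hc⟩
  | succ m ih =>
      intro p hp h
      rw [alt_prefix_len]
      by_cases hc : (p < ctx.length ∧ s + p < nd.length ∧
          tokens_compatible (ctx.getD p "") ((nd.getD (s + p) (0, "")).2) = true)
      · rw [dif_pos hc]
        refine ih (p + 1) (by omega) ?_
        intro j hj
        rcases Nat.lt_succ_iff_lt_or_eq.mp hj with hj' | rfl
        · exact h j hj'
        · exact hc
      · rw [dif_neg hc]
        exact ⟨h, hc⟩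

lemma le_mlen_iff (ctx : List String) (nd : List (Int × String)) (s w : Nat) :
    w ≤ alt_prefix_len ctx nd s 0 ↔ ∀ j, j < w → goodTok ctx nd s j := by
  obtain ⟨hg, hng⟩ := plen_spec ctx nd s 0 (by omega)
  constructor
  · intro hw j hj
    exact hg j (by omega)
  · intro h
    by_contra hlt
    exact hng (h _ (by omega))

lemma mlen_bounds (ctx : List String) (nd : List (Int × String)) (s : Nat) (hs : s < nd.length) :
    alt_prefix_len ctx nd s 0 ≤ ctx.length ∧ s + alt_prefix_len ctx nd s 0 ≤ nd.length := by
  obtain ⟨hg, -⟩ := plen_spec ctx nd s 0 (by omega)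
  rcases Nat.eq_zero_or_pos (alt_prefix_len ctx nd s 0) with h0 | h0
  · omega
  · obtain ⟨h1, h2, -⟩ := hg (alt_prefix_len ctx nd s 0 - 1) (by omega)
    omega

lemma getD_take_of_lt (l : List String) (k w : Nat) (d : String) (h : k < w) :
    (l.take w).getD k d = l.getD k d := by
  rcases Nat.lt_or_ge k l.length with hk | hk
  · rw [List.getD_eq_getElem _ _ (by simp; omega), List.getD_eq_getElem _ _ hk, List.getElem_take]
  · rw [List.getD_eq_default _ _ (by simp; omega), List.getD_eq_default _ _ (by omega)]

lemma allOK_iff (ctx : List String) (nd : List (Int × String)) (w s : Nat)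
    (hw : w ≤ ctx.length) (hs : s + w ≤ nd.length) :
    ((PySem.List.pyRange 0 (w : Int) 1).all (fun j =>
        tokens_compatible (PySem.List.pyGetD (PySem.List.slice ctx none (some (w : Int))) j "")
          (PySem.List.pyGetD nd ((s : Int) + j) (0, "")).2) = true)
      ↔ w ≤ alt_prefix_len ctx nd s 0 := by
  rw [le_mlen_iff, PySem.List.pyRange_zero]
  simp only [List.all_map, List.all_eq_true, List.mem_range, Int.toNat_natCast,
    Function.comp_def, PySem.List.slice_to_natCast, PySem.List.pyGetD_natCast]
  have key : ∀ k, k < w →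
      ((tokens_compatible ((ctx.take w).getD k "") ((PySem.List.pyGetD nd ((s : Int) + (k : Nat)) (0, "")).2) = true)
        ↔ tokens_compatible (ctx.getD k "") ((nd.getD (s + k) (0, "")).2) = true) := by
    intro k hk
    rw [getD_take_of_lt _ _ _ _ hk]
    have hcast : (s : Int) + (k : Nat) = ((s + k : Nat) : Int) := by push_cast; ring
    rw [hcast, PySem.List.pyGetD_natCast]
  constructor
  · intro h j hj
    exact ⟨by omega, by omega, (key j hj).mp (h j hj)⟩
  · intro h k hk
    exact (key k hk).mpr (h k hk).2.2

lemma inner_eq_none (ctx : List String) (nd : List (Int × String)) (w : Int)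
    (hw0 : 0 ≤ w) (hwk : w ≤ (ctx.length : Int))
    (h : ∀ s : Nat, (s : Int) + w ≤ (nd.length : Int) → ¬ (w ≤ (alt_prefix_len ctx nd s 0 : Int))) :
    A_tryW ctx nd w = none := by
  simp only [A_tryW]
  rw [List.findSome?_eq_none_iff]
  intro x hx
  rw [PySem.List.mem_pyRange_one] at hx
  lift w to Nat using hw0
  lift x to Nat using hx.1
  rw [if_neg]
  intro hall
  rw [allOK_iff ctx nd w x (by exact_mod_cast hwk) (by omega)] at hall
  exact h x (by omega) (by exact_mod_cast hall)

lemma inner_eq_some (ctx : List String) (nd : List (Int × String)) (w : Int) (s0 : Nat)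
    (hw0 : 0 ≤ w) (hwk : w ≤ (ctx.length : Int))
    (hs : (s0 : Int) + w ≤ (nd.length : Int))
    (hgood : w ≤ (alt_prefix_len ctx nd s0 0 : Int))
    (hmin : ∀ s : Nat, s < s0 → ¬ (w ≤ (alt_prefix_len ctx nd s 0 : Int))) :
    A_tryW ctx nd w = some (nd.getD s0 (0, "")).1 := by
  simp only [A_tryW]
  lift w to Nat using hw0
  rw [PySem.List.pyRange_one_append 0 (s0 : Int) ((nd.length : Int) - w + 1) (by omega) (by omega),
    List.findSome?_append]
  have h1 : (PySem.List.pyRange 0 (s0 : Int) 1).findSome? (fun start =>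
      if (PySem.List.pyRange 0 (w : Int) 1).all (fun j =>
          tokens_compatible (PySem.List.pyGetD (PySem.List.slice ctx none (some (w : Int))) j "")
            (PySem.List.pyGetD nd (start + j) (0, "")).2)
      then some (PySem.List.pyGetD nd start (0, "")).1
      else none) = none := by
    rw [List.findSome?_eq_none_iff]
    intro x hx
    rw [PySem.List.mem_pyRange_one] at hx
    lift x to Nat using hx.1
    rw [if_neg]
    intro hall
    rw [allOK_iff ctx nd w x (by exact_mod_cast hwk) (by omega)] at hall
    exact hmin x (by omega) (by exact_mod_cast hall)
  rw [h1, PySem.List.pyRange_one_cons (by omega : (s0 : Int) < (nd.length : Int) - w + 1),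
    List.findSome?_cons]
  rw [if_pos]
  · simp [PySem.List.pyGetD_natCast]
  · rw [allOK_iff ctx nd w s0 (by exact_mod_cast hwk) (by omega)]
    exact_mod_cast hgood

lemma pyRange_neg_one_nil (a b : Int) (h : a ≤ b) : PySem.List.pyRange a b (-1) = [] := by
  simp [PySem.List.pyRange, show ¬ (b < a) by omega]

lemma pyRange_neg_one_eq_map (a b : Int) :
    PySem.List.pyRange a b (-1) = (List.range (a - b).toNat).map (fun k : Nat => a - (k : Int)) := by
  simp only [PySem.List.pyRange]
  rw [if_neg (by norm_num), if_neg (by norm_num : ¬ (0:Int) < -1)]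
  by_cases h : b < a
  · rw [if_pos h, show (a - b + -(-1) - 1) / -(-1) = a - b by norm_num]
    exact List.map_congr_left (fun x _ => by ring)
  · rw [if_neg h, show (a - b).toNat = 0 by omega]
    simp

lemma pyRange_neg_one_cons (a b : Int) (h : b < a) :
    PySem.List.pyRange a b (-1) = a :: PySem.List.pyRange (a - 1) b (-1) := by
  rw [pyRange_neg_one_eq_map, pyRange_neg_one_eq_map,
    show (a - b).toNat = (a - 1 - b).toNat + 1 by omega, List.range_succ_eq_map]
  simp only [List.map_cons, List.map_map, Nat.cast_zero, sub_zero]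
  refine congrArg _ (List.map_congr_left (fun x _ => ?_))
  simp only [Function.comp_apply, Nat.succ_eq_add_one]
  push_cast
  ring

lemma mem_pyRange_neg_one {a b x : Int} : x ∈ PySem.List.pyRange a b (-1) ↔ b < x ∧ x ≤ a := by
  rw [pyRange_neg_one_eq_map]
  simp only [List.mem_map, List.mem_range]
  constructor
  · rintro ⟨k, hk, rfl⟩; omega
  · rintro ⟨h1, h2⟩; exact ⟨(a - x).toNat, by omega, by omega⟩

lemma findSome?_pyRange_neg_skip (f : Int → Option Int) (b : Int) :
    ∀ (n : Nat) (a M : Int), M ≤ a → (a - M).toNat ≤ n →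
      (∀ x, M < x → x ≤ a → f x = none) →
      (PySem.List.pyRange a b (-1)).findSome? f = (PySem.List.pyRange M b (-1)).findSome? f := by
  intro n
  induction n with
  | zero =>
      intro a M h1 h2 _
      rw [show a = M by omega]
  | succ n ih =>
      intro a M h1 h2 hnone
      rcases eq_or_lt_of_le h1 with rfl | hlt
      · rfl
      · rcases lt_or_ge b a with hb | hb
        · rw [pyRange_neg_one_cons a b hb, List.findSome?_cons, hnone a hlt le_rfl]
          exact ih (a - 1) M (by omega) (by omega) (fun x hx1 hx2 => hnone x hx1 (by omega))
        · rw [pyRange_neg_one_nil a b hb, pyRange_neg_one_nil M b (by omega)]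

lemma alt_scan_go (ctx : List String) (nd : List (Int × String)) : ∀ m : Nat,
    (m = 0 ∧ (List.range m).foldl
        (fun acc start =>
          let p := alt_prefix_len ctx nd start 0
          if (p : Int) > acc.1 then ((p : Int), (start : Int)) else acc) (-1, -1) = (-1, -1)) ∨
    (∃ s0 : Nat, s0 < m ∧
      (List.range m).foldl
        (fun acc start =>
          let p := alt_prefix_len ctx nd start 0
          if (p : Int) > acc.1 then ((p : Int), (start : Int)) else acc) (-1, -1)
        = ((alt_prefix_len ctx nd s0 0 : Int), (s0 : Int)) ∧
      (∀ s, s < m → alt_prefix_len ctx nd s 0 ≤ alt_prefix_len ctx nd s0 0) ∧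
      (∀ s, s < s0 → alt_prefix_len ctx nd s 0 < alt_prefix_len ctx nd s0 0)) := by
  intro m
  induction m with
  | zero => exact Or.inl ⟨rfl, rfl⟩
  | succ m ih =>
      rw [List.range_succ, List.foldl_append, List.foldl_cons, List.foldl_nil]
      rcases ih with ⟨rfl, hf⟩ | ⟨s0, hs0, hf, hmax, hmin⟩
      · rw [hf]
        refine Or.inr ⟨0, by omega, ?_, ?_, by omega⟩
        · simp only []
          rw [if_pos (by omega)]
        · intro s hs
          rw [show s = 0 by omega]
      · rw [hf]
        simp only []
        by_cases hc : (alt_prefix_len ctx nd m 0 : Int) > (alt_prefix_len ctx nd s0 0 : Int)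
        · rw [if_pos hc]
          refine Or.inr ⟨m, by omega, rfl, ?_, ?_⟩
          · intro s hs
            rcases Nat.lt_succ_iff_lt_or_eq.mp hs with hs' | rfl
            · have := hmax s hs'; omega
            · omega
          · intro s hs
            have := hmax s (by omega); omega
        · rw [if_neg hc]
          refine Or.inr ⟨s0, by omega, rfl, ?_, hmin⟩
          intro s hs
          rcases Nat.lt_succ_iff_lt_or_eq.mp hs with hs' | rfl
          · exact hmax s hs'
          · omega

lemma alt_scan_spec (ctx : List String) (nd : List (Int × String)) :
    (nd.length = 0 ∧ alt_scan ctx nd = (-1, -1)) ∨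
    (∃ s0 : Nat, s0 < nd.length ∧
      alt_scan ctx nd = ((alt_prefix_len ctx nd s0 0 : Int), (s0 : Int)) ∧
      (∀ s, s < nd.length → alt_prefix_len ctx nd s 0 ≤ alt_prefix_len ctx nd s0 0) ∧
      (∀ s, s < s0 → alt_prefix_len ctx nd s 0 < alt_prefix_len ctx nd s0 0)) := by
  exact alt_scan_go ctx nd nd.length

lemma search_eq (ctx : List String) (nd : List (Int × String)) (mw : Int)
    (h0 : nd = [] → 1 ≤ mw) :
    A_search ctx nd mw =
      (if (alt_scan ctx nd).1 ≥ mw then (PySem.List.pyGet? nd (alt_scan ctx nd).2).map Prod.fst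
       else none) := by
  rcases alt_scan_spec ctx nd with ⟨hn, hsc⟩ | ⟨s0, hs0, hsc, hmax, hmin⟩
  · -- new_nd is empty: Pre_ gives 1 ≤ mw, both sides are none
    have hnil : nd = [] := List.length_eq_zero_iff.mp hn
    have hmw : 1 ≤ mw := h0 hnil
    rw [hsc, if_neg (by omega)]
    simp only [A_search]
    rw [List.findSome?_eq_none_iff]
    intro x hx
    rw [mem_pyRange_neg_one] at hx
    exact inner_eq_none ctx nd x (by omega) (by omega) (fun s hs => by omega)
  · have hb := mlen_bounds ctx nd s0 hs0
    rw [hsc]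
    by_cases hge : ((alt_prefix_len ctx nd s0 0 : Int)) ≥ mw
    · rw [if_pos hge]
      have hnone : ∀ x : Int, (alt_prefix_len ctx nd s0 0 : Int) < x → x ≤ (ctx.length : Int) →
          A_tryW ctx nd x = none := by
        intro x hx1 hx2
        refine inner_eq_none ctx nd x (by omega) hx2 (fun s hs => ?_)
        have hsn : s < nd.length := by omega
        have := hmax s hsn
        omega
      simp only [A_search]
      rw [findSome?_pyRange_neg_skip (A_tryW ctx nd) (mw - 1)
            ((ctx.length : Int) - (alt_prefix_len ctx nd s0 0 : Int)).toNat
            (ctx.length : Int) (alt_prefix_len ctx nd s0 0 : Int)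
            (by omega) (by omega) hnone,
          pyRange_neg_one_cons _ _ (by omega), List.findSome?_cons,
          inner_eq_some ctx nd (alt_prefix_len ctx nd s0 0 : Int) s0 (by omega) (by omega)
            (by omega) (by omega)
            (fun s hs => by have := hmin s hs; omega)]
      rw [PySem.List.pyGet?_natCast, List.getElem?_eq_getElem hs0]
      rw [List.getD_eq_getElem _ _ hs0]
      rfl
    · rw [if_neg hge]
      simp only [A_search]
      rw [List.findSome?_eq_none_iff]
      intro x hx
      rw [mem_pyRange_neg_one] at hx
      refine inner_eq_none ctx nd x (by omega) (by omega) (fun s hs => ?_)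
      have hsn : s < nd.length := by omega
      have := hmax s hsn
      omega

-- ===== VERDICT (by name: the statement is the Claim_ definition above) =====
theorem find_context_in_new_spec : Claim_equal_find_context_in_new := by
  intro old_rows old_pos new_rows window min_window _hd hpre
  unfold Spec_find_context_in_new find_context_in_new find_context_in_new_alt
  cases hfi : List.findIdx? (fun p => decide (old_pos ≤ p.1)) (non_dash old_rows) with
  | none => simp only [hfi]
  | some s =>
      simp only [hfi]
      apply search_eq
      intro hnil
      by_contra hlt
      apply hpre
      refine ⟨by omega, (non_dash_aux_eq_nil_iff new_rows 0).mp hnil, ?_⟩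
      have hsome : (List.findIdx? (fun p => decide (old_pos ≤ p.1)) (non_dash old_rows)).isSome := by
        rw [hfi]; rfl
      rw [List.findIdx?_isSome] at hsome
      obtain ⟨x, hxmem, hx⟩ := List.any_eq_true.mp hsome
      obtain ⟨j, hj, hjd, hj1⟩ := mem_non_dash_aux old_rows 0 x hxmem
      exact ⟨j, hj, by simp at hx; omega, hjd⟩
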